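-- pv_equiv track=rewrite | github.com/anumohan10/Mediaid-AI | utils/ocr_utils.py | analyze_medical_document
-- ===== SOURCE A (Python) =====
-- from typing import Dict, List, Optional, Tuple
--
-- def analyze_medical_document(text: str) -> Dict[str, List[str]]:
--     """Analyze extracted text to identify medical document components."""
--     if not text:
--         return {}
--
--     text_lower = text.lower()
--     analysis = {}
--
--     # Look for medications
--     medication_keywords = ['mg', 'ml', 'tablet', 'capsule', 'syrup', 'injection', 'drops', 'ointment']
--     medications = []
--     lines = text.split('\n')
--     for line in lines:
--         line_lower = line.lower()
--         if any(keyword in line_lower for keyword in medication_keywords):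
--             medications.append(line.strip())
--     if medications:
--         analysis['medications'] = medications
--
--     # Look for vital signs
--     vital_patterns = ['bp:', 'blood pressure:', 'pulse:', 'temperature:', 'weight:', 'height:']
--     vitals = []
--     for line in lines:
--         line_lower = line.lower()
--         if any(pattern in line_lower for pattern in vital_patterns):
--             vitals.append(line.strip())
--     if vitals:
--         analysis['vitals'] = vitals
--
--     # Look for diagnoses
--     diagnosis_keywords = ['diagnosis:', 'diagnosed with', 'condition:', 'disease:', 'disorder:']
--     diagnoses = []
--     for line in lines:
--         line_lower = line.lower()
--         if any(keyword in line_lower for keyword in diagnosis_keywords):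
--             diagnoses.append(line.strip())
--     if diagnoses:
--         analysis['diagnoses'] = diagnoses
--
--     # Look for lab values
--     lab_keywords = ['hemoglobin', 'glucose', 'cholesterol', 'creatinine', 'urea', 'hba1c']
--     lab_values = []
--     for line in lines:
--         line_lower = line.lower()
--         if any(keyword in line_lower for keyword in lab_keywords):
--             lab_values.append(line.strip())
--     if lab_values:
--         analysis['lab_values'] = lab_values
--
--     return analysis
-- ===== SOURCE B (Python) =====
-- def analyze_medical_document(text: str):
--     """Single pass over the lines: each line is classified against all four
--     keyword groups at once, then the result dict is assembled from the
--     non-empty buckets in the fixed key order."""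
--     if not text:
--         return {}
--
--     MED = ['mg', 'ml', 'tablet', 'capsule', 'syrup', 'injection', 'drops', 'ointment']
--     VIT = ['bp:', 'blood pressure:', 'pulse:', 'temperature:', 'weight:', 'height:']
--     DIAG = ['diagnosis:', 'diagnosed with', 'condition:', 'disease:', 'disorder:']
--     LAB = ['hemoglobin', 'glucose', 'cholesterol', 'creatinine', 'urea', 'hba1c']
--
--     medications, vitals, diagnoses, lab_values = [], [], [], []
--     for line in text.split('\n'):
--         ll = line.lower()
--         s = line.strip()
--         if any(k in ll for k in MED):
--             medications.append(s)
--         if any(k in ll for k in VIT):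
--             vitals.append(s)
--         if any(k in ll for k in DIAG):
--             diagnoses.append(s)
--         if any(k in ll for k in LAB):
--             lab_values.append(s)
--
--     analysis = {}
--     if medications:
--         analysis['medications'] = medications
--     if vitals:
--         analysis['vitals'] = vitals
--     if diagnoses:
--         analysis['diagnoses'] = diagnoses
--     if lab_values:
--         analysis['lab_values'] = lab_values
--     return analysis
-- ===== Notes on version B (the rewrite author's own statement) =====
-- stated objective: simpler
-- what changed: Replaces A's four separate passes over the line list (each re-lowering every line) with one pass that lowers and strips each line once and appends it to every matching bucket, then assembles the dict from the non-empty buckets.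
import Mathlib
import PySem

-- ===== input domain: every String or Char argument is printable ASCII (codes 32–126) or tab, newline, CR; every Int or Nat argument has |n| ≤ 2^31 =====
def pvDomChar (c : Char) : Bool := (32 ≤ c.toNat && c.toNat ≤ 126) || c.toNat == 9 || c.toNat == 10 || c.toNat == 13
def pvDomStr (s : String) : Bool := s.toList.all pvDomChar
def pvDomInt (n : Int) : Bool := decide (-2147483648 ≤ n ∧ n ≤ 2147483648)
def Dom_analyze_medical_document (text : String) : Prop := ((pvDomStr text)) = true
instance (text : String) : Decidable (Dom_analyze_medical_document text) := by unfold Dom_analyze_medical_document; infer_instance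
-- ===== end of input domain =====

-- B replaces A's four passes over the lines with one pass filling all four buckets; objective: simpler.

-- keyword constants shared by both programs
def pvMedKws : List String := ["mg", "ml", "tablet", "capsule", "syrup", "injection", "drops", "ointment"]
def pvVitKws : List String := ["bp:", "blood pressure:", "pulse:", "temperature:", "weight:", "height:"]
def pvDiagKws : List String := ["diagnosis:", "diagnosed with", "condition:", "disease:", "disorder:"]
def pvLabKws : List String := ["hemoglobin", "glucose", "cholesterol", "creatinine", "urea", "hba1c"]

-- any(keyword in ll for keyword in kws)
def pvHit (kws : List String) (ll : String) : Bool := kws.any (fun k => PySem.Str.isIn k ll)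

-- ===== PORT A =====
def analyze_medical_document (text : String) : List (String × List String) :=
  if text = "" then []
  else
    let lines := (PySem.Chars.splitOn text.toList ['\n']).map String.ofList
    let medications := lines.foldl (fun acc line =>
      if pvHit pvMedKws (PySem.Str.lower line) then acc ++ [PySem.Str.strip line] else acc) []
    let analysis : List (String × List String) :=
      if medications = [] then [] else [("medications", medications)]
    let vitals := lines.foldl (fun acc line =>
      if pvHit pvVitKws (PySem.Str.lower line) then acc ++ [PySem.Str.strip line] else acc) []
    let analysis := if vitals = [] then analysis else analysis ++ [("vitals", vitals)]
    let diagnoses := lines.foldl (fun acc line =>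
      if pvHit pvDiagKws (PySem.Str.lower line) then acc ++ [PySem.Str.strip line] else acc) []
    let analysis := if diagnoses = [] then analysis else analysis ++ [("diagnoses", diagnoses)]
    let lab_values := lines.foldl (fun acc line =>
      if pvHit pvLabKws (PySem.Str.lower line) then acc ++ [PySem.Str.strip line] else acc) []
    let analysis := if lab_values = [] then analysis else analysis ++ [("lab_values", lab_values)]
    analysis

-- ===== PORT B =====
def analyze_medical_document_alt (text : String) : List (String × List String) :=
  if text = "" then []
  else
    let b := ((PySem.Chars.splitOn text.toList ['\n']).map String.ofList).foldl
      (fun (b : List String × List String × List String × List String) line =>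
        let ll := PySem.Str.lower line
        let s := PySem.Str.strip line
        (if pvHit pvMedKws ll then b.1 ++ [s] else b.1,
         if pvHit pvVitKws ll then b.2.1 ++ [s] else b.2.1,
         if pvHit pvDiagKws ll then b.2.2.1 ++ [s] else b.2.2.1,
         if pvHit pvLabKws ll then b.2.2.2 ++ [s] else b.2.2.2))
      ([], [], [], [])
    (if b.1 = [] then [] else [("medications", b.1)]) ++
    (if b.2.1 = [] then [] else [("vitals", b.2.1)]) ++
    (if b.2.2.1 = [] then [] else [("diagnoses", b.2.2.1)]) ++
    (if b.2.2.2 = [] then [] else [("lab_values", b.2.2.2)])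

-- ===== PRECONDITION & SPEC =====
def Spec_analyze_medical_document (text : String) (out : List (String × List String)) : Prop := out = analyze_medical_document_alt text
instance (text : String) (out : List (String × List String)) : Decidable (Spec_analyze_medical_document text out) := by unfold Spec_analyze_medical_document; infer_instance

-- ===== CLAIM (what is proved, stated in full; the proofs are below) =====
def Claim_equal_analyze_medical_document : Prop := ∀ (text : String), Dom_analyze_medical_document text → Spec_analyze_medical_document text (analyze_medical_document text)

-- ===== LEMMAS AND PROOFS =====

-- B's single pass computes, in each bucket, the same filter-map as A's dedicated pass.
lemma pvBuckets_eq (lines : List String) (a b c d : List String) :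
    lines.foldl
      (fun (t : List String × List String × List String × List String) line =>
        let ll := PySem.Str.lower line
        let s := PySem.Str.strip line
        (if pvHit pvMedKws ll then t.1 ++ [s] else t.1,
         if pvHit pvVitKws ll then t.2.1 ++ [s] else t.2.1,
         if pvHit pvDiagKws ll then t.2.2.1 ++ [s] else t.2.2.1,
         if pvHit pvLabKws ll then t.2.2.2 ++ [s] else t.2.2.2))
      (a, b, c, d)
    = (a ++ (lines.filter (fun l => pvHit pvMedKws (PySem.Str.lower l))).map PySem.Str.strip,
       b ++ (lines.filter (fun l => pvHit pvVitKws (PySem.Str.lower l))).map PySem.Str.strip,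
       c ++ (lines.filter (fun l => pvHit pvDiagKws (PySem.Str.lower l))).map PySem.Str.strip,
       d ++ (lines.filter (fun l => pvHit pvLabKws (PySem.Str.lower l))).map PySem.Str.strip) := by
  induction lines generalizing a b c d with
  | nil => simp
  | cons x xs ih =>
    simp only [List.foldl_cons, List.filter_cons]
    rw [ih]
    split_ifs <;> simp

-- ===== VERDICT (by name: the statement is the Claim_ definition above) =====
theorem analyze_medical_document_spec : Claim_equal_analyze_medical_document := by
  intro text _
  unfold Spec_analyze_medical_document analyze_medical_document analyze_medical_document_alt
  by_cases h : text = ""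
  · simp [h]
  · simp only [h, if_false]
    rw [pvBuckets_eq]
    rw [PySem.List.foldl_append_if (fun l => pvHit pvMedKws (PySem.Str.lower l)) PySem.Str.strip,
        PySem.List.foldl_append_if (fun l => pvHit pvVitKws (PySem.Str.lower l)) PySem.Str.strip,
        PySem.List.foldl_append_if (fun l => pvHit pvDiagKws (PySem.Str.lower l)) PySem.Str.strip,
        PySem.List.foldl_append_if (fun l => pvHit pvLabKws (PySem.Str.lower l)) PySem.Str.strip]
    split_ifs <;> simp
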